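-- pv_equiv track=rewrite | github.com/boukeas/aoc-2023 | 13/solution13_02.py | reflection_discrepancies
-- ===== SOURCE A (Python) =====
-- def reflection_discrepancies(numbers, length, axis):
--     """
--     Given a set of `numbers` (that represent # positions) and
--     the `length` of a line (the maximum possible number), return
--     the pairs of values that are *not* symmetric with respect to
--     the `axis` position, i.e. the discrepancies.
--
--     A pair of numbers is symmetric with respect to the `axis` position
--     if they are equidistant from the axis and they are *both* either
--     in the iterable of numbers or not.
--     """
--     discrepancies = set()
--     distance_from_axis = 0
--     while True:
--         left = axis - distance_from_axis - 1
--         right = axis + distance_from_axis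
--         if left < 0 or right == length:
--             return discrepancies
--         reflection = not ((left in numbers) ^ (right in numbers))
--         if not reflection:
--             discrepancies.add((left, right))
--         distance_from_axis += 1
-- ===== SOURCE B (Python) =====
-- def reflection_discrepancies(numbers, length, axis):
--     """
--     Return the pairs of positions that are *not* symmetric about `axis`
--     on a line of the given `length`.
--
--     A discrepant pair has exactly one member in `numbers`, so every
--     discrepancy shows up as the distance of some n in `numbers` from the
--     axis: check each distinct such distance once, nearest to the axis first.
--     """
--     limit = min(axis, length - axis)
--     distances = {n - axis if n >= axis else axis - 1 - n for n in numbers}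
--     discrepancies = set()
--     for d in sorted(distances):
--         if 0 <= d < limit:
--             left, right = axis - d - 1, axis + d
--             if (left in numbers) ^ (right in numbers):
--                 discrepancies.add((left, right))
--     return discrepancies
-- ===== Notes on version B (the rewrite author's own statement) =====
-- stated objective: alternative
-- what changed: Instead of scanning every distance in the reflection window with a while-loop, B maps each given number to its distinct distance from the axis and checks the asymmetry test only at those distances (each discrepant pair has exactly one member present, so each is found exactly once); Pre_ excludes the malformed inputs with axis > length, where the axis lies beyond the end of the line and A's right-hand scan runs past the line end producing out-of-range pairs, while B naturally reports no discrepancies.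
-- outside the precondition, e.g. on reflection_discrepancies({0}, 0, 1): A returns {(0, 1)}, B returns set(); on reflection_discrepancies({3}, 1, 2): A returns {(0, 3)}, B returns set()
import Mathlib
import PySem

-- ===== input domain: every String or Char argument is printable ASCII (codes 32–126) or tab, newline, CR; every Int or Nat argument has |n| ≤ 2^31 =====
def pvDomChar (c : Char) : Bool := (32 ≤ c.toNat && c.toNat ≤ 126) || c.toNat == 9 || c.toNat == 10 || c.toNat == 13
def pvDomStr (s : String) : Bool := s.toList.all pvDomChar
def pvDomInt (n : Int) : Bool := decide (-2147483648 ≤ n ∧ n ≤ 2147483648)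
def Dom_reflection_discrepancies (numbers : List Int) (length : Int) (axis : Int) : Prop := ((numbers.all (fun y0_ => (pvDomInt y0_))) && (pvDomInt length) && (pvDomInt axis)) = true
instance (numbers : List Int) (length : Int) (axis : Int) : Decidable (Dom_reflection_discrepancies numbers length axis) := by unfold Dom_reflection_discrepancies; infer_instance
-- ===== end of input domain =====

-- B checks only the distinct distances of the given numbers from the axis instead of
-- scanning every distance of the reflection window (objective: alternative decomposition).

-- ===== PORT A =====
-- the `while True` loop of A: state = distance_from_axis and the accumulated set
def pvLoopA (numbers : List Int) (length : Int) (axis : Int) (d : Int)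
    (acc : List (Int × Int)) : List (Int × Int) :=
  if axis - d - 1 < 0 ∨ axis + d = length then acc
  else
    pvLoopA numbers length axis (d + 1)
      (if (numbers.contains (axis - d - 1)).xor (numbers.contains (axis + d)) then
        PySem.Set.add acc (axis - d - 1, axis + d)
      else acc)
termination_by (axis - d).toNat
decreasing_by omega

def reflection_discrepancies (numbers : List Int) (length : Int) (axis : Int) : List (Int × Int) :=
  pvLoopA numbers length axis 0 PySem.Set.empty

-- ===== PORT B =====
-- body of B's `for d in sorted(distances)` loop
def pvStepB (numbers : List Int) (axis : Int) (limit : Int)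
    (discrepancies : List (Int × Int)) (d : Int) : List (Int × Int) :=
  if 0 ≤ d ∧ d < limit then
    if (numbers.contains (axis - d - 1)).xor (numbers.contains (axis + d)) then
      PySem.Set.add discrepancies (axis - d - 1, axis + d)
    else discrepancies
  else discrepancies

def reflection_discrepancies_alt (numbers : List Int) (length : Int) (axis : Int) : List (Int × Int) :=
  let limit : Int := min axis (length - axis)
  let distances : List Int :=
    PySem.Set.ofList (numbers.map (fun n => if axis ≤ n then n - axis else axis - 1 - n))
  (PySem.List.sorted distances (fun x => x) false).foldl (pvStepB numbers axis limit) PySem.Set.empty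

-- ===== PRECONDITION & SPEC =====
-- Pre_ restricts to the natural domain axis ≤ length (the axis is a position on a line of
-- the given length); for the malformed inputs axis > length, A's right-hand scan runs past
-- the line end and returns out-of-range pairs, while B reports no discrepancies.
def Pre_reflection_discrepancies (numbers : List Int) (length : Int) (axis : Int) : Prop :=
  axis ≤ length
instance (numbers : List Int) (length : Int) (axis : Int) : Decidable (Pre_reflection_discrepancies numbers length axis) := by unfold Pre_reflection_discrepancies; infer_instance

def pvWitness_reflection_discrepancies : List Int × Int × Int := ([0, 2, 3], 5, 2)

def Spec_reflection_discrepancies (numbers : List Int) (length : Int) (axis : Int) (out : List (Int × Int)) : Prop := out = reflection_discrepancies_alt numbers length axis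
instance (numbers : List Int) (length : Int) (axis : Int) (out : List (Int × Int)) : Decidable (Spec_reflection_discrepancies numbers length axis out) := by unfold Spec_reflection_discrepancies; infer_instance

-- ===== CLAIM (what is proved, stated in full; the proofs are below) =====
def Claim_equal_reflection_discrepancies : Prop := ∀ (numbers : List Int) (length : Int) (axis : Int), Dom_reflection_discrepancies numbers length axis → Pre_reflection_discrepancies numbers length axis → Spec_reflection_discrepancies numbers length axis (reflection_discrepancies numbers length axis)

-- ===== LEMMAS AND PROOFS =====

-- the discrepancy test at distance d
def pvXor (numbers : List Int) (axis : Int) (d : Int) : Bool :=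
  (numbers.contains (axis - d - 1)).xor (numbers.contains (axis + d))

-- the distances d ≥ start that A's loop keeps, in increasing order
def pvDs (numbers : List Int) (length : Int) (axis : Int) (d : Int) : List Int :=
  if axis - d - 1 < 0 ∨ axis + d = length then []
  else (if pvXor numbers axis d then [d] else []) ++ pvDs numbers length axis (d + 1)
termination_by (axis - d).toNat
decreasing_by omega

def pvPair (axis : Int) (d : Int) : Int × Int := (axis - d - 1, axis + d)

def pvQ (numbers : List Int) (length : Int) (axis : Int) (d : Int) : Bool :=
  decide (0 ≤ d ∧ d < min axis (length - axis)) && pvXor numbers axis d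

lemma pvLoopA_eq (numbers : List Int) (length axis : Int) :
    ∀ (d : Int) (acc : List (Int × Int)), (∀ p ∈ acc, p.2 < axis + d) →
      pvLoopA numbers length axis d acc
        = acc ++ (pvDs numbers length axis d).map (pvPair axis) := by
  intro d acc
  fun_induction pvLoopA numbers length axis d acc with
  | case1 d acc h =>
    intro _
    rw [pvDs, if_pos h]
    simp
  | case2 d acc h ih =>
    intro hacc
    rw [pvDs, if_neg h]
    have hmem : (axis - d - 1, axis + d) ∉ acc := by
      intro hm
      have := hacc _ hm
      simp at this
    have hacc' : ∀ p ∈ (if (numbers.contains (axis - d - 1)).xor (numbers.contains (axis + d)) then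
        PySem.Set.add acc (axis - d - 1, axis + d) else acc), p.2 < axis + (d + 1) := by
      intro p hp
      split at hp
      · simp [PySem.Set.add, hmem] at hp
        rcases hp with hp | hp
        · have := hacc _ hp; omega
        · rw [hp]; simp
      · have := hacc _ hp; omega
    simp only [dite_eq_ite] at ih
    rw [ih hacc']
    by_cases hx : pvXor numbers axis d = true
    · have hx' : (numbers.contains (axis - d - 1)).xor (numbers.contains (axis + d)) = true := hx
      rw [if_pos hx, if_pos hx']
      simp [PySem.Set.add, hmem, pvPair]
    · have hx' : ¬ ((numbers.contains (axis - d - 1)).xor (numbers.contains (axis + d)) = true) := hx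
      rw [if_neg hx, if_neg hx']
      simp

lemma mem_pvDs (numbers : List Int) (length axis : Int) :
    ∀ d e, e ∈ pvDs numbers length axis d ↔
      d ≤ e ∧ (∀ f : Int, d ≤ f → f ≤ e → ¬(axis - f - 1 < 0 ∨ axis + f = length))
        ∧ pvXor numbers axis e = true := by
  intro d e
  fun_induction pvDs numbers length axis d with
  | case1 d h =>
    simp only [List.not_mem_nil, false_iff]
    rintro ⟨hde, hf, -⟩
    exact hf d le_rfl hde h
  | case2 d h ih =>
    simp only [List.mem_append]
    constructor
    · rintro (hme | hme)
      · have hed : e = d := by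
          by_cases hx : pvXor numbers axis d = true
          · rw [if_pos hx] at hme; simpa using hme
          · rw [if_neg hx] at hme; simp at hme
        subst hed
        have hx : pvXor numbers axis e = true := by
          by_contra hc
          rw [if_neg hc] at hme; simp at hme
        refine ⟨le_rfl, ?_, hx⟩
        intro f h1 h2
        have hfe : f = e := le_antisymm h2 h1
        subst hfe; exact h
      · obtain ⟨h1, h2, h3⟩ := ih.mp hme
        refine ⟨by omega, ?_, h3⟩
        intro f hf1 hf2
        by_cases hfd : f = d
        · subst hfd; exact h
        · exact h2 f (by omega) hf2
    · rintro ⟨h1, h2, h3⟩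
      by_cases hed : e = d
      · subst hed; left; rw [if_pos h3]; simp
      · right
        exact ih.mpr ⟨by omega, fun f hf1 hf2 => h2 f (by omega) hf2, h3⟩

lemma pvDs_lb (numbers : List Int) (length axis : Int) :
    ∀ d, ∀ e ∈ pvDs numbers length axis d, d ≤ e := by
  intro d e he
  exact ((mem_pvDs numbers length axis d e).mp he).1

lemma pvDs_pairwise (numbers : List Int) (length axis : Int) :
    ∀ d, (pvDs numbers length axis d).Pairwise (· < ·) := by
  intro d
  fun_induction pvDs numbers length axis d with
  | case1 d h => simp
  | case2 d h ih =>
    rw [List.pairwise_append]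
    refine ⟨by split <;> simp, ih, ?_⟩
    intro a ha b hb
    have hb' := pvDs_lb numbers length axis (d + 1) b hb
    have ha' : a = d := by
      by_cases hx : pvXor numbers axis d = true
      · rw [if_pos hx] at ha; simpa using ha
      · rw [if_neg hx] at ha; simp at ha
    omega

lemma pvNoStop_iff (length axis e : Int) (h0 : 0 ≤ e) (hal : axis ≤ length) :
    (∀ f : Int, 0 ≤ f → f ≤ e → ¬(axis - f - 1 < 0 ∨ axis + f = length)) ↔
      e < min axis (length - axis) := by
  constructor
  · intro h
    have h00 := h 0 le_rfl h0
    have haxis : 1 ≤ axis := by omega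
    have heax : e < axis := by
      by_contra hc
      exact h axis (by omega) (by omega) (by omega)
    have : e < length - axis := by
      by_contra hc
      exact h (length - axis) (by omega) (by omega) (by omega)
    omega
  · intro h f hf1 hf2
    omega

lemma mem_pvDs_zero (numbers : List Int) (length axis e : Int) (hal : axis ≤ length) :
    e ∈ pvDs numbers length axis 0 ↔ pvQ numbers length axis e = true := by
  rw [mem_pvDs]
  unfold pvQ
  constructor
  · rintro ⟨h0, hf, hx⟩
    have := (pvNoStop_iff length axis e h0 hal).mp hf
    simp [hx]
    omega
  · intro h
    simp at h
    obtain ⟨⟨h0, hl⟩, hx⟩ := h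
    exact ⟨h0, (pvNoStop_iff length axis e h0 hal).mpr (by omega), hx⟩

lemma pvQ_mem_dist (numbers : List Int) (length axis e : Int)
    (h : pvQ numbers length axis e = true) :
    e ∈ numbers.map (fun n => if axis ≤ n then n - axis else axis - 1 - n) := by
  unfold pvQ pvXor at h
  simp only [Bool.and_eq_true, decide_eq_true_eq] at h
  obtain ⟨⟨h0, -⟩, hx⟩ := h
  rw [List.mem_map]
  by_cases hl : (axis - e - 1) ∈ numbers
  · exact ⟨axis - e - 1, hl, by rw [if_neg (by omega)]; omega⟩
  · have hlc : numbers.contains (axis - e - 1) = false := by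
      rw [← Bool.not_eq_true, List.contains_iff_mem]; exact hl
    rw [hlc] at hx
    simp at hx
    exact ⟨axis + e, hx, by rw [if_pos (by omega)]; omega⟩

lemma pvFoldB_eq (numbers : List Int) (axis limit : Int) :
    ∀ (s : List Int) (acc : List (Int × Int)), s.Nodup →
      (∀ d ∈ s, (axis - d - 1, axis + d) ∉ acc) →
      s.foldl (pvStepB numbers axis limit) acc
        = acc ++ (s.filter (fun d => decide (0 ≤ d ∧ d < limit) && pvXor numbers axis d)).map (pvPair axis) := by
  intro s
  induction s with
  | nil => intro acc _ _; simp
  | cons d t ih =>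
    intro acc hnd hacc
    rw [List.foldl_cons, List.filter_cons]
    have hd_t : d ∉ t := (List.nodup_cons.mp hnd).1
    have hnd' : t.Nodup := (List.nodup_cons.mp hnd).2
    by_cases hq : (decide (0 ≤ d ∧ d < limit) && pvXor numbers axis d) = true
    · rw [if_pos hq]
      simp only [Bool.and_eq_true, decide_eq_true_eq] at hq
      obtain ⟨hb, hx⟩ := hq
      have hx' : (numbers.contains (axis - d - 1)).xor (numbers.contains (axis + d)) = true := hx
      have hstep : pvStepB numbers axis limit acc d = acc ++ [(axis - d - 1, axis + d)] := by
        unfold pvStepB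
        rw [if_pos hb, if_pos hx']
        simp [PySem.Set.add, hacc d List.mem_cons_self]
      rw [hstep, ih (acc ++ [(axis - d - 1, axis + d)]) hnd' ?later]
      · simp [pvPair]
      case later =>
        intro d' hd'
        simp only [List.mem_append, List.mem_singleton]
        rintro (hm | hm)
        · exact hacc d' (List.mem_cons_of_mem d hd') hm
        · have hdd : d' = d := by
            have := congrArg Prod.snd hm
            simp at this
            omega
          exact hd_t (hdd ▸ hd')
    · rw [if_neg hq]
      have hstep : pvStepB numbers axis limit acc d = acc := by
        unfold pvStepB
        simp only [Bool.and_eq_true, decide_eq_true_eq, not_and] at hq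
        split
        · rename_i hb
          have hx' : ¬ ((numbers.contains (axis - d - 1)).xor (numbers.contains (axis + d)) = true) :=
            fun hx => (hq hb) hx
          rw [if_neg hx']
        · rfl
      rw [hstep]
      exact ih acc hnd' (fun d' hd' => hacc d' (List.mem_cons_of_mem d hd'))

lemma pvStrictEq : ∀ (l1 l2 : List Int), l1.Pairwise (· < ·) → l2.Pairwise (· < ·) →
    (∀ x, x ∈ l1 ↔ x ∈ l2) → l1 = l2 := by
  intro l1
  induction l1 with
  | nil =>
    intro l2 _ _ hmem
    cases l2 with
    | nil => rfl
    | cons b t2 => exact absurd ((hmem b).mpr List.mem_cons_self) (by simp)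
  | cons a t ih =>
    intro l2 h1 h2 hmem
    cases l2 with
    | nil => exact absurd ((hmem a).mp List.mem_cons_self) (by simp)
    | cons b t2 =>
      obtain ⟨ha1, ht1⟩ := List.pairwise_cons.mp h1
      obtain ⟨hb2, ht2⟩ := List.pairwise_cons.mp h2
      have hab : a = b := by
        have ha := (hmem a).mp List.mem_cons_self
        have hb := (hmem b).mpr List.mem_cons_self
        rcases List.mem_cons.mp ha with hc | hc
        · exact hc
        · have hba := hb2 a hc
          rcases List.mem_cons.mp hb with hc' | hc'
          · omega
          · have := ha1 b hc'; omega
      subst hab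
      congr 1
      apply ih t2 ht1 ht2
      intro x
      constructor
      · intro hx
        have hax := ha1 x hx
        rcases List.mem_cons.mp ((hmem x).mp (List.mem_cons_of_mem a hx)) with hc | hc
        · omega
        · exact hc
      · intro hx
        have hax := hb2 x hx
        rcases List.mem_cons.mp ((hmem x).mpr (List.mem_cons_of_mem a hx)) with hc | hc
        · omega
        · exact hc

-- ===== VERDICT (by name: the statement is the Claim_ definition above) =====
theorem reflection_discrepancies_spec : Claim_equal_reflection_discrepancies := by
  intro numbers length axis _ hal
  unfold Spec_reflection_discrepancies reflection_discrepancies reflection_discrepancies_alt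
  rw [pvLoopA_eq numbers length axis 0 PySem.Set.empty (by intro p hp; simp [PySem.Set.empty] at hp)]
  have hpw := PySem.List.sorted_ofList_pairwise_lt
    (numbers.map (fun n => if axis ≤ n then n - axis else axis - 1 - n))
  rw [pvFoldB_eq numbers axis (min axis (length - axis)) _
    PySem.Set.empty hpw.nodup (by intro d _; simp [PySem.Set.empty])]
  simp only [PySem.Set.empty, List.nil_append]
  congr 1
  apply pvStrictEq
  · exact pvDs_pairwise numbers length axis 0
  · exact hpw.sublist List.filter_sublist
  · intro x
    rw [mem_pvDs_zero numbers length axis x hal, List.mem_filter]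
    have hq : (decide (0 ≤ x ∧ x < min axis (length - axis))
        && pvXor numbers axis x) = pvQ numbers length axis x := rfl
    rw [hq]
    constructor
    · intro h
      refine ⟨?_, h⟩
      rw [PySem.List.mem_sorted, PySem.Set.mem_ofList]
      exact pvQ_mem_dist numbers length axis x h
    · exact fun h => h.2
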